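-- pv_equiv track=rewrite | github.com/DiToroGH/TrenSofB | core/services.py | generar_asignacion
-- ===== SOURCE A (Python) =====
-- def generar_asignacion(
--     conductores: list[str],
--     orden_acompaniantes: list[str],
--     disponibles: set[str],
-- ) -> tuple[list[tuple[str, str]], list[str]]:
--     orden = orden_acompaniantes[:]
--     idx = 0
--     no_disponibles_hoy: list[str] = []
--     asignaciones: list[tuple[str, str]] = []
--     for conductor in conductores:
--         intentos = 0
--         asignado = False
--         while intentos < len(orden):
--             acomp = orden[idx]
--             if acomp in disponibles:
--                 asignaciones.append((conductor, acomp))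
--                 idx = (idx + 1) % len(orden)
--                 asignado = True
--                 break
--             no_disponibles_hoy.append(acomp)
--             idx = (idx + 1) % len(orden)
--             intentos += 1
--         if not asignado:
--             asignaciones.append((conductor, "SIN ACOMPAÑANTE"))
--     return asignaciones, list(dict.fromkeys(no_disponibles_hoy))
-- ===== SOURCE B (Python) =====
-- def generar_asignacion(
--     conductores: list[str],
--     orden_acompaniantes: list[str],
--     disponibles: set[str],
-- ) -> tuple[list[tuple[str, str]], list[str]]:
--     orden = orden_acompaniantes
--     n = len(orden)
--     c = len(conductores)
--     avail_pos = [i for i in range(n) if orden[i] in disponibles]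
--     m = len(avail_pos)
--     if m == 0:
--         asignaciones = [(cond, "SIN ACOMPAÑANTE") for cond in conductores]
--         limit = n if c > 0 else 0
--     else:
--         asignaciones = [(conductores[t], orden[avail_pos[t % m]])
--                         for t in range(c)]
--         limit = 0 if c == 0 else (n if m < c else avail_pos[c - 1])
--     no_disp = list(dict.fromkeys(
--         a for a in orden[:limit] if a not in disponibles))
--     return asignaciones, no_disp
-- ===== Notes on version B (the rewrite author's own statement) =====
-- stated objective: alternative
-- what changed: Replaces the per-conductor circular scans over orden with a closed form: one pass collects the available positions, conductor t is assigned orden[avail_pos[t % m]] directly, and the not-available-today list is read off as the deduplicated non-available entries of the visited prefix orden[:limit].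
import Mathlib
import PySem

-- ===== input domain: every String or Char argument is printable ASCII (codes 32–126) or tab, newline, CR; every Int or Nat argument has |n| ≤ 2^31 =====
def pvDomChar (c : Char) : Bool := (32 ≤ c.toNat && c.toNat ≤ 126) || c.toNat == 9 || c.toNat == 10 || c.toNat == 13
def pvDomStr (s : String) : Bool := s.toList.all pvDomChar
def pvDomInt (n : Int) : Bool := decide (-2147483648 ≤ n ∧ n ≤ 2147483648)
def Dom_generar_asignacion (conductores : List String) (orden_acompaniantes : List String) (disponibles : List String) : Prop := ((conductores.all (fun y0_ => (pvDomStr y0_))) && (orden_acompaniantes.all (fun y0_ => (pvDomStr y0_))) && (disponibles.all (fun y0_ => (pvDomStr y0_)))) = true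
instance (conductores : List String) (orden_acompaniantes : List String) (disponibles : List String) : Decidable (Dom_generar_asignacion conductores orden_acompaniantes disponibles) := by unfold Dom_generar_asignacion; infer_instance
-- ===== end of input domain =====

-- B replaces A's per-conductor circular scans by a closed form over the precomputed
-- available positions (objective: alternative algorithm, same observable results).

-- ===== PORT A =====
-- Inner 'while intentos < len(orden)' loop of A: fuel counts the remaining attempts.
-- Python's idx is always a nonnegative in-range index (idx = (idx+1) % len(orden)),
-- so Nat arithmetic with % is exact and orden[idx] is ported as getD with an
-- unreachable default.
def pvScanA (orden disponibles : List String) : Nat → Nat → List String →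
    Option String × Nat × List String
  | 0, idx, nd => (none, idx, nd)
  | fuel+1, idx, nd =>
    let acomp := orden.getD idx ""
    if disponibles.contains acomp then
      (some acomp, (idx + 1) % orden.length, nd)
    else
      pvScanA orden disponibles fuel ((idx + 1) % orden.length) (nd ++ [acomp])

-- one iteration of A's 'for conductor in conductores' loop over the state (idx, no_disponibles_hoy, asignaciones)
def pvStepA (orden disponibles : List String)
    (st : Nat × List String × List (String × String)) (conductor : String) :
    Nat × List String × List (String × String) :=
  match pvScanA orden disponibles orden.length st.1 st.2.1 with
  | (some acomp, idx', nd') => (idx', nd', st.2.2 ++ [(conductor, acomp)])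
  | (none, idx', nd') => (idx', nd', st.2.2 ++ [(conductor, "SIN ACOMPAÑANTE")])

def generar_asignacion (conductores : List String) (orden_acompaniantes : List String) (disponibles : List String) : (List (String × String)) × List String :=
  let orden := orden_acompaniantes
  let fin := conductores.foldl (pvStepA orden disponibles) (0, [], [])
  (fin.2.2, PySem.List.dedup fin.2.1)

-- ===== PORT B =====
def generar_asignacion_alt (conductores : List String) (orden_acompaniantes : List String) (disponibles : List String) : (List (String × String)) × List String :=
  let orden := orden_acompaniantes
  let n := orden.length
  let c := conductores.length
  let avail_pos := (List.range n).filter (fun i => disponibles.contains (orden.getD i ""))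
  let m := avail_pos.length
  let asignaciones :=
    if m = 0 then conductores.map (fun cond => (cond, "SIN ACOMPAÑANTE"))
    else (List.range c).map (fun t => (conductores.getD t "", orden.getD (avail_pos.getD (t % m) 0) ""))
  let limit :=
    if m = 0 then (if 0 < c then n else 0)
    else if c = 0 then 0 else if m < c then n else avail_pos.getD (c - 1) 0
  (asignaciones, PySem.List.dedup ((orden.take limit).filter (fun a => !disponibles.contains a)))

-- ===== PRECONDITION & SPEC =====
def Spec_generar_asignacion (conductores : List String) (orden_acompaniantes : List String) (disponibles : List String) (out : (List (String × String)) × List String) : Prop := out = generar_asignacion_alt conductores orden_acompaniantes disponibles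
instance (conductores : List String) (orden_acompaniantes : List String) (disponibles : List String) (out : (List (String × String)) × List String) : Decidable (Spec_generar_asignacion conductores orden_acompaniantes disponibles out) := by unfold Spec_generar_asignacion; infer_instance

-- ===== CLAIM (what is proved, stated in full; the proofs are below) =====
def Claim_equal_generar_asignacion : Prop := ∀ (conductores : List String) (orden_acompaniantes : List String) (disponibles : List String), Dom_generar_asignacion conductores orden_acompaniantes disponibles → Spec_generar_asignacion conductores orden_acompaniantes disponibles (generar_asignacion conductores orden_acompaniantes disponibles)

-- ===== LEMMAS AND PROOFS =====

-- availability of index i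
def pvAvail (orden disponibles : List String) (i : Nat) : Bool :=
  disponibles.contains (orden.getD i "")

-- the sorted list of available positions (B's avail_pos)
def pvAP (orden disponibles : List String) : List Nat :=
  (List.range orden.length).filter (fun i => pvAvail orden disponibles i)

-- unrolled pointer of A after t conductors (only meaningful when pvAP is nonempty)
def pvNP (orden disponibles : List String) (t : Nat) : Nat :=
  if t = 0 then 0 else
    orden.length * ((t - 1) / (pvAP orden disponibles).length)
      + (pvAP orden disponibles).getD ((t - 1) % (pvAP orden disponibles).length) 0 + 1

-- unrolled position of the acompañante consumed by conductor number t
def pvQ (orden disponibles : List String) (t : Nat) : Nat :=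
  orden.length * (t / (pvAP orden disponibles).length)
    + (pvAP orden disponibles).getD ((t % (pvAP orden disponibles).length)) 0

-- closed form of A's asignaciones from conductor number t on
def pvAssigns (orden disponibles : List String) : Nat → List String → List (String × String)
  | _, [] => []
  | t, c :: cs =>
    (c, orden.getD ((pvAP orden disponibles).getD (t % (pvAP orden disponibles).length) 0) "")
      :: pvAssigns orden disponibles (t + 1) cs

lemma pv_mem_AP (orden disponibles : List String) (x : Nat) :
    x ∈ pvAP orden disponibles ↔ x < orden.length ∧ pvAvail orden disponibles x = true := by
  simp [pvAP, List.mem_filter, List.mem_range]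

lemma pv_AP_pairwise (orden disponibles : List String) :
    (pvAP orden disponibles).Pairwise (· < ·) :=
  (List.pairwise_lt_range).filter _

lemma pv_AP_lt (orden disponibles : List String) {j : Nat}
    (hj : j < (pvAP orden disponibles).length) :
    (pvAP orden disponibles)[j] < orden.length ∧
      pvAvail orden disponibles ((pvAP orden disponibles)[j]) = true :=
  (pv_mem_AP orden disponibles _).1 (List.getElem_mem hj)

lemma pv_AP_mono (orden disponibles : List String) {j k : Nat}
    (hj : j < k) (hk : k < (pvAP orden disponibles).length) :
    (pvAP orden disponibles)[j]'(lt_trans hj hk) < (pvAP orden disponibles)[k] := by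
  exact (List.pairwise_iff_getElem.mp (pv_AP_pairwise orden disponibles)) _ _ _ _ hj

lemma pv_no_avail (orden disponibles : List String) (a b : Nat)
    (hgap : ∀ k, (hk : k < (pvAP orden disponibles).length) →
      ¬ (a ≤ (pvAP orden disponibles)[k] ∧ (pvAP orden disponibles)[k] < b))
    (x : Nat) (hax : a ≤ x) (hxb : x < b) (hxn : x < orden.length) :
    ¬ pvAvail orden disponibles x = true := by
  intro hav
  obtain ⟨k, hk, hkx⟩ := List.getElem_of_mem ((pv_mem_AP orden disponibles x).2 ⟨hxn, hav⟩)
  exact hgap k hk (by rw [hkx]; exact ⟨hax, hxb⟩)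

lemma pv_mod_succ (u n : Nat) : (u % n + 1) % n = (u + 1) % n := by
  conv_rhs => rw [Nat.add_mod]
  rw [Nat.add_mod (u % n) 1]
  simp

lemma pv_AP_le (orden disponibles : List String) {j k : Nat} (hjk : j ≤ k)
    (hk : k < (pvAP orden disponibles).length) :
    (pvAP orden disponibles)[j]'(lt_of_le_of_lt hjk hk) ≤ (pvAP orden disponibles)[k] := by
  rcases Nat.eq_or_lt_of_le hjk with h | h
  · subst h; exact le_refl _
  · exact (pv_AP_mono orden disponibles h hk).le

lemma pv_mul_add_mod (n r w : Nat) (hw : w < n) : (n * r + w) % n = w := by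
  rw [Nat.mul_add_mod]
  exact Nat.mod_eq_of_lt hw

lemma pv_scan_found (orden disponibles : List String)
    (q : Nat) (hq : pvAvail orden disponibles (q % orden.length) = true) :
    ∀ fuel u nd, u ≤ q → q - u < fuel →
      (∀ v, u ≤ v → v < q → ¬ pvAvail orden disponibles (v % orden.length) = true) →
      pvScanA orden disponibles fuel (u % orden.length) nd =
        (some (orden.getD (q % orden.length) ""), (q + 1) % orden.length,
          nd ++ (List.range' u (q - u)).map (fun v => orden.getD (v % orden.length) "")) := by
  intro fuel
  induction fuel with
  | zero => intro u nd _ h; omega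
  | succ f ih =>
    intro u nd huq hf hmin
    by_cases hav : pvAvail orden disponibles (u % orden.length) = true
    · have hu : u = q := by
        by_contra h
        exact hmin u le_rfl (by omega) hav
      subst hu
      simp [pvAvail] at hav
      simp [pvScanA, hav, pv_mod_succ]
    · have huq' : u < q := by
        rcases Nat.lt_or_ge u q with h | h
        · exact h
        · exact absurd (by omega : u = q) (fun e => hav (e ▸ hq))
      have step : pvScanA orden disponibles (f+1) (u % orden.length) nd =
          pvScanA orden disponibles f ((u % orden.length + 1) % orden.length)
            (nd ++ [orden.getD (u % orden.length) ""]) := by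
        simp [pvAvail] at hav
        simp [pvScanA, hav]
      rw [step, pv_mod_succ]
      rw [ih (u+1) (nd ++ [orden.getD (u % orden.length) ""]) (by omega) (by omega)
        (fun v h1 h2 => hmin v (by omega) h2)]
      have : q - u = (q - (u+1)) + 1 := by omega
      rw [this, List.range'_succ]
      simp

lemma pv_scan_none (orden disponibles : List String)
    (hnone : ∀ j, j < orden.length → ¬ pvAvail orden disponibles j = true) :
    ∀ fuel i nd, i + fuel = orden.length →
      pvScanA orden disponibles fuel (i % orden.length) nd =
        (none, (i + fuel) % orden.length,
          nd ++ (List.range' i fuel).map (fun v => orden.getD v "")) := by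
  intro fuel
  induction fuel with
  | zero => intro i nd h; simp [pvScanA]
  | succ f ih =>
    intro i nd h
    have hi : i < orden.length := by omega
    have him : i % orden.length = i := Nat.mod_eq_of_lt hi
    have hav := hnone i hi
    have step : pvScanA orden disponibles (f+1) (i % orden.length) nd =
        pvScanA orden disponibles f ((i % orden.length + 1) % orden.length)
          (nd ++ [orden.getD (i % orden.length) ""]) := by
      simp [pvAvail] at hav
      simp [pvScanA, him, hav]
    rw [step, pv_mod_succ, ih (i+1) _ (by omega)]
    rw [List.range'_succ]
    have e : i + (f + 1) = i + 1 + f := by omega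
    rw [e]
    simp [him]

lemma pv_divmod_succ (t m : Nat) (hm : 0 < m) :
    ((t % m + 1 < m → (t + 1) % m = t % m + 1 ∧ (t + 1) / m = t / m) ∧
     (t % m + 1 = m → (t + 1) % m = 0 ∧ (t + 1) / m = t / m + 1)) := by
  have hdm := Nat.div_add_mod t m
  constructor
  · intro h
    have e : t + 1 = (t % m + 1) + m * (t / m) := by omega
    rw [e, Nat.add_mul_mod_self_left, Nat.add_mul_div_left _ _ hm]
    exact ⟨Nat.mod_eq_of_lt h, by rw [Nat.div_eq_of_lt h]; omega⟩
  · intro h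
    have e : t + 1 = 0 + m * (t / m + 1) := by rw [Nat.mul_add, Nat.mul_one]; omega
    rw [e, Nat.add_mul_mod_self_left, Nat.add_mul_div_left _ _ hm]
    simp [Nat.zero_div, Nat.zero_mod]

lemma pv_NP_le_Q (orden disponibles : List String)
    (hm : 0 < (pvAP orden disponibles).length) (t : Nat) :
    pvNP orden disponibles t ≤ pvQ orden disponibles t ∧
      pvQ orden disponibles t - pvNP orden disponibles t < orden.length ∧
      (∀ v, pvNP orden disponibles t ≤ v → v < pvQ orden disponibles t →
        ¬ pvAvail orden disponibles (v % orden.length) = true) ∧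
      pvNP orden disponibles (t + 1) = pvQ orden disponibles t + 1 := by
  have hn0 : 0 < orden.length := lt_of_le_of_lt (Nat.zero_le _) (pv_AP_lt orden disponibles hm).1
  have hQdef : ∀ s : Nat, (hs : s % (pvAP orden disponibles).length < (pvAP orden disponibles).length) →
      pvQ orden disponibles s =
        orden.length * (s / (pvAP orden disponibles).length) +
          (pvAP orden disponibles)[s % (pvAP orden disponibles).length]'hs := by
    intro s hs
    rw [pvQ, List.getD_eq_getElem _ _ hs]
  have hNPs : ∀ s : Nat, (hs : s % (pvAP orden disponibles).length < (pvAP orden disponibles).length) →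
      pvNP orden disponibles (s + 1) =
        orden.length * (s / (pvAP orden disponibles).length) +
          (pvAP orden disponibles)[s % (pvAP orden disponibles).length]'hs + 1 := by
    intro s hs
    rw [pvNP, if_neg (Nat.succ_ne_zero s), Nat.add_sub_cancel, List.getD_eq_getElem _ _ hs]
  have hNPQ : ∀ s : Nat, pvNP orden disponibles (s + 1) = pvQ orden disponibles s + 1 := by
    intro s
    rw [hNPs s (Nat.mod_lt _ hm), hQdef s (Nat.mod_lt _ hm)]
  rcases Nat.eq_zero_or_pos t with ht | ht
  · subst ht
    have h0 : pvNP orden disponibles 0 = 0 := by rw [pvNP]; simp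
    have hq : pvQ orden disponibles 0 = (pvAP orden disponibles)[0]'hm := by
      rw [hQdef 0 (by simpa using hm), Nat.zero_div, Nat.mul_zero, Nat.zero_add]
      simp [Nat.zero_mod]
    have h0n : (pvAP orden disponibles)[0]'hm < orden.length := (pv_AP_lt orden disponibles hm).1
    refine ⟨by omega, by omega, ?_, hNPQ 0⟩
    intro v _ hv
    rw [hq] at hv
    have hvn : v < orden.length := lt_trans hv h0n
    rw [Nat.mod_eq_of_lt hvn]
    refine pv_no_avail orden disponibles 0 ((pvAP orden disponibles)[0]'hm) ?_ v (Nat.zero_le _) hv hvn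
    intro k hk ⟨h1, h2⟩
    exact absurd (pv_AP_le orden disponibles (Nat.zero_le k) hk) (by omega)
  · obtain ⟨s, rfl⟩ : ∃ s, t = s + 1 := ⟨t - 1, by omega⟩
    have hj : s % (pvAP orden disponibles).length < (pvAP orden disponibles).length := Nat.mod_lt _ hm
    have hNP := hNPs s hj
    have hdm := pv_divmod_succ s (pvAP orden disponibles).length hm
    have hjn : (pvAP orden disponibles)[s % (pvAP orden disponibles).length]'hj < orden.length :=
      (pv_AP_lt orden disponibles hj).1
    by_cases hcase : s % (pvAP orden disponibles).length + 1 < (pvAP orden disponibles).length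
    · have hmod : (s + 1) % (pvAP orden disponibles).length = s % (pvAP orden disponibles).length + 1 := (hdm.1 hcase).1
      have hdiv : (s + 1) / (pvAP orden disponibles).length = s / (pvAP orden disponibles).length := (hdm.1 hcase).2
      have hQ : pvQ orden disponibles (s + 1) =
          orden.length * (s / (pvAP orden disponibles).length) +
            (pvAP orden disponibles)[s % (pvAP orden disponibles).length + 1]'hcase := by
        rw [hQdef (s+1) (Nat.mod_lt _ hm)]
        congr 1 <;> simp [hmod, hdiv]
      have hlt : (pvAP orden disponibles)[s % (pvAP orden disponibles).length]'hj <
          (pvAP orden disponibles)[s % (pvAP orden disponibles).length + 1]'hcase :=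
        pv_AP_mono orden disponibles (by omega) hcase
      have hBn : (pvAP orden disponibles)[s % (pvAP orden disponibles).length + 1]'hcase < orden.length :=
        (pv_AP_lt orden disponibles hcase).1
      refine ⟨by omega, by omega, ?_, hNPQ (s+1)⟩
      intro v hv1 hv2
      rw [hNP] at hv1; rw [hQ] at hv2
      have hwlt : v - orden.length * (s / (pvAP orden disponibles).length) < orden.length := by omega
      have hw : v = orden.length * (s / (pvAP orden disponibles).length) +
          (v - orden.length * (s / (pvAP orden disponibles).length)) := by omega
      rw [hw, pv_mul_add_mod _ _ _ hwlt]
      refine pv_no_avail orden disponibles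
        ((pvAP orden disponibles)[s % (pvAP orden disponibles).length]'hj + 1)
        ((pvAP orden disponibles)[s % (pvAP orden disponibles).length + 1]'hcase) ?_ _ (by omega) (by omega) hwlt
      intro k hk ⟨h1, h2⟩
      rcases Nat.lt_or_ge (s % (pvAP orden disponibles).length) k with h | h
      · exact absurd (pv_AP_le orden disponibles
            (show s % (pvAP orden disponibles).length + 1 ≤ k by omega) hk) (by omega)
      · exact absurd (pv_AP_le orden disponibles h hj) (by omega)
    · have hjm : s % (pvAP orden disponibles).length + 1 = (pvAP orden disponibles).length := by omega
      have hmod : (s + 1) % (pvAP orden disponibles).length = 0 := (hdm.2 hjm).1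
      have hdiv : (s + 1) / (pvAP orden disponibles).length = s / (pvAP orden disponibles).length + 1 := (hdm.2 hjm).2
      have hQ : pvQ orden disponibles (s + 1) =
          orden.length * (s / (pvAP orden disponibles).length + 1) + (pvAP orden disponibles)[0]'hm := by
        rw [hQdef (s+1) (Nat.mod_lt _ hm)]
        congr 1 <;> simp [hmod, hdiv]
      have h0j : (pvAP orden disponibles)[0]'hm ≤ (pvAP orden disponibles)[s % (pvAP orden disponibles).length]'hj :=
        pv_AP_le orden disponibles (Nat.zero_le _) hj
      have h0n : (pvAP orden disponibles)[0]'hm < orden.length := (pv_AP_lt orden disponibles hm).1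
      have hmul : orden.length * (s / (pvAP orden disponibles).length + 1) =
          orden.length * (s / (pvAP orden disponibles).length) + orden.length := by ring
      refine ⟨by omega, by omega, ?_, hNPQ (s+1)⟩
      intro v hv1 hv2
      rw [hNP] at hv1; rw [hQ, hmul] at hv2
      rcases Nat.lt_or_ge v (orden.length * (s / (pvAP orden disponibles).length) + orden.length) with hvc | hvc
      · have hwlt : v - orden.length * (s / (pvAP orden disponibles).length) < orden.length := by omega
        have hw : v = orden.length * (s / (pvAP orden disponibles).length) +
            (v - orden.length * (s / (pvAP orden disponibles).length)) := by omega
        rw [hw, pv_mul_add_mod _ _ _ hwlt]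
        refine pv_no_avail orden disponibles
          ((pvAP orden disponibles)[s % (pvAP orden disponibles).length]'hj + 1)
          orden.length ?_ _ (by omega) hwlt hwlt
        intro k hk ⟨h1, h2⟩
        have hkj : k ≤ s % (pvAP orden disponibles).length := by omega
        exact absurd (pv_AP_le orden disponibles hkj hj) (by omega)
      · have hwlt : v - (orden.length * (s / (pvAP orden disponibles).length) + orden.length) <
            (pvAP orden disponibles)[0]'hm := by omega
        have hwn : v - (orden.length * (s / (pvAP orden disponibles).length) + orden.length) < orden.length :=
          lt_trans hwlt h0n
        have hw : v = orden.length * (s / (pvAP orden disponibles).length + 1) +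
            (v - (orden.length * (s / (pvAP orden disponibles).length) + orden.length)) := by rw [hmul]; omega
        rw [hw, pv_mul_add_mod _ _ _ hwn]
        refine pv_no_avail orden disponibles 0 ((pvAP orden disponibles)[0]'hm) ?_ _ (Nat.zero_le _) hwlt hwn
        intro k hk ⟨h1, h2⟩
        exact absurd (pv_AP_le orden disponibles (Nat.zero_le k) hk) (by omega)

lemma pv_map_range_take (l : List String) (k : Nat) (hk : k ≤ l.length) :
    (List.range k).map (fun v => l.getD v "") = l.take k := by
  apply List.ext_getElem
  · simp [hk]
  · intro i h1 h2
    simp at h1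
    simp [List.getElem?_eq_getElem (lt_of_lt_of_le h1 hk)]

lemma pv_dedup_absorb (l e : List String) (he : ∀ x ∈ e, x ∈ l) :
    PySem.List.dedup (l ++ e) = PySem.List.dedup l := by
  simp only [PySem.List.dedup_eq_ofList, PySem.Set.ofList_append,
    PySem.Set.update_eq_append_filter]
  have : (PySem.Set.ofList e).filter (fun y => !(PySem.Set.contains (PySem.Set.ofList l) y)) = [] := by
    rw [List.filter_eq_nil_iff]
    intro a ha
    have : a ∈ l := he a ((PySem.Set.mem_ofList _ _).1 ha)
    simp [PySem.Set.contains, this]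
  rw [this, List.append_nil]

lemma pv_fold_pos (orden disponibles : List String)
    (hm : 0 < (pvAP orden disponibles).length) :
    ∀ (cs : List String) (t : Nat) (nd : List String) (asg : List (String × String)),
      cs.foldl (pvStepA orden disponibles) (pvNP orden disponibles t % orden.length, nd, asg) =
        (pvNP orden disponibles (t + cs.length) % orden.length,
         nd ++ ((List.range' (pvNP orden disponibles t)
                  (pvNP orden disponibles (t + cs.length) - pvNP orden disponibles t)).map
                  (fun v => orden.getD (v % orden.length) "")).filter
                  (fun a => !disponibles.contains a),
         asg ++ pvAssigns orden disponibles t cs) := by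
  intro cs
  induction cs with
  | nil =>
    intro t nd asg
    simp [pvAssigns]
  | cons c cs ih =>
    intro t nd asg
    obtain ⟨h1, h2, h3, h4⟩ := pv_NP_le_Q orden disponibles hm t
    have hmono : pvNP orden disponibles (t + 1) ≤ pvNP orden disponibles (t + 1 + cs.length) := by
      clear h1 h2 h3 h4
      induction cs.length with
      | zero => exact le_refl _
      | succ k ihk =>
        have hle := (pv_NP_le_Q orden disponibles hm (t + 1 + k)).1
        have h4' := (pv_NP_le_Q orden disponibles hm (t + 1 + k)).2.2.2
        have e : t + 1 + (k + 1) = t + 1 + k + 1 := by omega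
        rw [e]
        omega
    have hj : t % (pvAP orden disponibles).length < (pvAP orden disponibles).length :=
      Nat.mod_lt _ hm
    have hQmod : pvQ orden disponibles t % orden.length =
        (pvAP orden disponibles)[t % (pvAP orden disponibles).length]'hj := by
      rw [pvQ, List.getD_eq_getElem _ _ hj]
      exact pv_mul_add_mod _ _ _ (pv_AP_lt orden disponibles hj).1
    have hav : pvAvail orden disponibles (pvQ orden disponibles t % orden.length) = true := by
      rw [hQmod]; exact (pv_AP_lt orden disponibles hj).2
    have hscan := pv_scan_found orden disponibles (pvQ orden disponibles t) hav
      orden.length (pvNP orden disponibles t) nd h1 h2 h3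
    have hstep : pvStepA orden disponibles
        (pvNP orden disponibles t % orden.length, nd, asg) c =
        (pvNP orden disponibles (t + 1) % orden.length,
         nd ++ (List.range' (pvNP orden disponibles t)
                 (pvQ orden disponibles t - pvNP orden disponibles t)).map
                 (fun v => orden.getD (v % orden.length) ""),
         asg ++ [(c, orden.getD (pvQ orden disponibles t % orden.length) "")]) := by
      simp only [pvStepA, hscan]
      rw [h4]
    rw [List.foldl_cons, hstep, ih (t + 1)]
    have hlen : t + 1 + cs.length = t + (c :: cs).length := by simp; omega
    rw [hlen]
    refine congrArg₂ Prod.mk rfl (congrArg₂ Prod.mk ?_ ?_)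
    · -- the no_disponibles component
      rw [List.append_assoc]
      congr 1
      have hskip : (List.range' (pvNP orden disponibles t)
          (pvQ orden disponibles t - pvNP orden disponibles t)).map
            (fun v => orden.getD (v % orden.length) "") =
          ((List.range' (pvNP orden disponibles t)
            (pvNP orden disponibles (t + 1) - pvNP orden disponibles t)).map
            (fun v => orden.getD (v % orden.length) "")).filter
            (fun a => !disponibles.contains a) := by
        have e1 : pvNP orden disponibles (t + 1) - pvNP orden disponibles t =
            (pvQ orden disponibles t - pvNP orden disponibles t) + 1 := by omega
        rw [e1, List.range'_concat]
        have e2 : pvNP orden disponibles t + 1 * (pvQ orden disponibles t - pvNP orden disponibles t)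
            = pvQ orden disponibles t := by omega
        rw [e2, List.map_append, List.filter_append]
        have e3 : (List.filter (fun a => !disponibles.contains a)
            ((List.range' (pvNP orden disponibles t)
              (pvQ orden disponibles t - pvNP orden disponibles t)).map
              (fun v => orden.getD (v % orden.length) ""))) =
            (List.range' (pvNP orden disponibles t)
              (pvQ orden disponibles t - pvNP orden disponibles t)).map
              (fun v => orden.getD (v % orden.length) "") := by
        -- every skipped entry is non-available
          rw [List.filter_eq_self]
          intro a ha
          obtain ⟨v, hv, rfl⟩ := List.mem_map.1 ha
          have hv' := List.mem_range'_1.1 hv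
          have := h3 v hv'.1 (by omega)
          simp [pvAvail] at this
          simp [this]
        have e4 : (List.filter (fun a => !disponibles.contains a)
            ([pvQ orden disponibles t].map (fun v => orden.getD (v % orden.length) ""))) = [] := by
          simp [pvAvail] at hav
          simp [hav]
        rw [e3, e4, List.append_nil]
      rw [hskip, ← List.filter_append, ← List.map_append]
      have e5 : pvNP orden disponibles t + (pvNP orden disponibles (t+1) - pvNP orden disponibles t)
          = pvNP orden disponibles (t + 1) := by omega
      have := List.range'_append (s := pvNP orden disponibles t)
        (m := pvNP orden disponibles (t+1) - pvNP orden disponibles t)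
        (n := pvNP orden disponibles (t + (c :: cs).length) - pvNP orden disponibles (t+1))
        (step := 1)
      rw [Nat.one_mul, e5] at this
      rw [hlen] at hmono
      have hm1 : pvNP orden disponibles t ≤ pvNP orden disponibles (t + 1) := by omega
      have e6 : pvNP orden disponibles (t + 1) - pvNP orden disponibles t +
          (pvNP orden disponibles (t + (c :: cs).length) - pvNP orden disponibles (t + 1)) =
          pvNP orden disponibles (t + (c :: cs).length) - pvNP orden disponibles t := by omega
      rw [e6] at this
      rw [this]
    · -- the asignaciones component
      rw [List.append_assoc]
      congr 1
      rw [pvAssigns, hQmod, List.getD_eq_getElem _ _ hj]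
      rfl

lemma pv_fold_zero (orden disponibles : List String)
    (hm : (pvAP orden disponibles).length = 0) :
    ∀ (cs : List String) (nd : List String) (asg : List (String × String)),
      cs.foldl (pvStepA orden disponibles) (0, nd, asg) =
        (0, nd ++ (List.replicate cs.length orden).flatten,
         asg ++ cs.map (fun c => (c, "SIN ACOMPAÑANTE"))) := by
  have hnone : ∀ j, j < orden.length → ¬ pvAvail orden disponibles j = true := by
    intro j hj hav
    have : j ∈ pvAP orden disponibles := (pv_mem_AP orden disponibles j).2 ⟨hj, hav⟩
    rw [List.length_eq_zero_iff.1 hm] at this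
    simp at this
  intro cs
  induction cs with
  | nil => intro nd asg; simp
  | cons c cs ih =>
    intro nd asg
    have hscan := pv_scan_none orden disponibles hnone orden.length 0 nd (by omega)
    rw [Nat.zero_mod] at hscan
    have hstep : pvStepA orden disponibles (0, nd, asg) c =
        (0, nd ++ orden, asg ++ [(c, "SIN ACOMPAÑANTE")]) := by
      simp only [pvStepA, hscan]
      have h1 : (0 + orden.length) % orden.length = 0 := by simp
      have h2 : (List.range' 0 orden.length).map (fun v => orden.getD v "") = orden := by
        rw [← List.range_eq_range', pv_map_range_take orden orden.length (le_refl _),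
          List.take_length]
      rw [h1, h2]
    rw [List.foldl_cons, hstep, ih]
    simp [List.replicate_succ]

-- the non-available values seen in the unrolled prefix [0, P)
lemma pv_F_le (orden disponibles : List String) (P : Nat) (hP : P ≤ orden.length) :
    ((List.range P).map (fun v => orden.getD (v % orden.length) "")).filter
      (fun a => !disponibles.contains a) =
    (orden.take P).filter (fun a => !disponibles.contains a) := by
  have : (List.range P).map (fun v => orden.getD (v % orden.length) "") =
      (List.range P).map (fun v => orden.getD v "") := by
    apply List.map_congr_left
    intro v hv
    rw [Nat.mod_eq_of_lt (lt_of_lt_of_le (List.mem_range.1 hv) hP)]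
  rw [this, pv_map_range_take orden P hP]

lemma pv_dedup_F_ge (orden disponibles : List String) (P : Nat)
    (hn : 0 < orden.length) (hP : orden.length ≤ P) :
    PySem.List.dedup (((List.range P).map (fun v => orden.getD (v % orden.length) "")).filter
      (fun a => !disponibles.contains a)) =
    PySem.List.dedup (((List.range orden.length).map
      (fun v => orden.getD (v % orden.length) "")).filter (fun a => !disponibles.contains a)) := by
  have hsplit : List.range P = List.range orden.length ++ List.range' orden.length (P - orden.length) := by
    rw [List.range_eq_range', List.range_eq_range']
    have := List.range'_append (s := 0) (m := orden.length) (n := P - orden.length) (step := 1)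
    rw [Nat.one_mul, Nat.zero_add] at this
    conv_lhs => rw [show P = orden.length + (P - orden.length) by omega]
    exact this.symm
  rw [hsplit, List.map_append, List.filter_append]
  apply pv_dedup_absorb
  intro x hx
  obtain ⟨v, hv, rfl⟩ := List.mem_map.1 (List.mem_filter.1 hx).1
  have hpx := (List.mem_filter.1 hx).2
  apply List.mem_filter.2
  refine ⟨List.mem_map.2 ⟨v % orden.length, List.mem_range.2 (Nat.mod_lt _ hn), ?_⟩, hpx⟩
  rw [Nat.mod_mod_of_dvd _ (dvd_refl _)]

lemma pv_assigns_eq (orden disponibles : List String) :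
    ∀ (cs : List String) (t0 : Nat),
      pvAssigns orden disponibles t0 cs =
        (List.range cs.length).map (fun k => (cs.getD k "",
          orden.getD ((pvAP orden disponibles).getD
            ((t0 + k) % (pvAP orden disponibles).length) 0) "")) := by
  intro cs
  induction cs with
  | nil => intro t0; simp [pvAssigns]
  | cons c cs ih =>
    intro t0
    rw [pvAssigns, List.length_cons, List.range_succ_eq_map, List.map_cons, List.map_map,
      ih (t0 + 1)]
    congr 1
    apply List.map_congr_left
    intro k _
    have e : t0 + 1 + k = t0 + (k + 1) := by omega
    simp [Function.comp, e]


-- ===== VERDICT (by name: the statement is the Claim_ definition above) =====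
theorem generar_asignacion_spec : Claim_equal_generar_asignacion := by
  intro conductores orden disponibles _
  show generar_asignacion conductores orden disponibles =
    generar_asignacion_alt conductores orden disponibles
  simp only [generar_asignacion, generar_asignacion_alt]
  have hap : (List.range orden.length).filter (fun i => disponibles.contains (orden.getD i ""))
      = pvAP orden disponibles := rfl
  rw [hap]
  by_cases hm0 : (pvAP orden disponibles).length = 0
  · -- nobody in orden is available: every conductor gets "SIN ACOMPAÑANTE"
    rw [if_pos hm0, if_pos hm0, pv_fold_zero orden disponibles hm0 conductores [] []]
    simp only [List.nil_append]
    refine congrArg₂ Prod.mk rfl ?_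
    have hone : ∀ a ∈ orden, (!disponibles.contains a) = true := by
      intro a ha
      obtain ⟨i, hi, rfl⟩ := List.mem_iff_getElem.1 ha
      have hmem : ¬ (i ∈ pvAP orden disponibles) := by
        rw [List.length_eq_zero_iff.1 hm0]; simp
      have hfalse : ¬ pvAvail orden disponibles i = true :=
        fun hav => hmem ((pv_mem_AP orden disponibles i).2 ⟨hi, hav⟩)
      have h2 : pvAvail orden disponibles i = false := by
        revert hfalse; cases pvAvail orden disponibles i <;> simp
      simp only [pvAvail] at h2
      rw [List.getD_eq_getElem _ _ hi] at h2
      simpa using h2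
    by_cases hc0 : 0 < conductores.length
    · rw [if_pos hc0, List.take_length, List.filter_eq_self.2 hone]
      obtain ⟨L, hL⟩ : ∃ L, conductores.length = L + 1 := ⟨conductores.length - 1, by omega⟩
      rw [hL, List.replicate_succ, List.flatten_cons]
      apply pv_dedup_absorb
      intro x hx
      obtain ⟨l, hl, hxl⟩ := List.mem_flatten.1 hx
      rw [List.eq_of_mem_replicate hl] at hxl
      exact hxl
    · rw [if_neg hc0]
      have hz : conductores.length = 0 := by omega
      rw [hz]
      simp
  · -- at least one acompañante is available
    have hm : 0 < (pvAP orden disponibles).length := Nat.pos_of_ne_zero hm0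
    have hn : 0 < orden.length :=
      lt_of_le_of_lt (Nat.zero_le _) (pv_AP_lt orden disponibles hm).1
    have hNP0 : pvNP orden disponibles 0 = 0 := by rw [pvNP]; simp
    conv_lhs => rw [show (0 : Nat) = pvNP orden disponibles 0 % orden.length by
      rw [hNP0, Nat.zero_mod]]
    rw [pv_fold_pos orden disponibles hm conductores 0 [] []]
    simp only [List.nil_append, Nat.zero_add, hNP0, Nat.sub_zero, ← List.range_eq_range']
    rw [if_neg hm0, if_neg hm0]
    refine congrArg₂ Prod.mk ?_ ?_
    · rw [pv_assigns_eq orden disponibles conductores 0]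
      simp
    · by_cases hc0 : conductores.length = 0
      · rw [if_pos hc0, hc0, hNP0]
        simp
      · rw [if_neg hc0]
        by_cases hcm : (pvAP orden disponibles).length < conductores.length
        · -- every position of orden has been visited
          rw [if_pos hcm]
          have hd : 1 ≤ (conductores.length - 1) / (pvAP orden disponibles).length :=
            (Nat.one_le_div_iff hm).2 (by omega)
          have hmul : orden.length * 1 ≤
              orden.length * ((conductores.length - 1) / (pvAP orden disponibles).length) :=
            Nat.mul_le_mul_left _ hd
          have hNP : pvNP orden disponibles conductores.length =
              orden.length * ((conductores.length - 1) / (pvAP orden disponibles).length)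
                + (pvAP orden disponibles).getD
                    ((conductores.length - 1) % (pvAP orden disponibles).length) 0 + 1 := by
            rw [pvNP, if_neg hc0]
          have hge : orden.length ≤ pvNP orden disponibles conductores.length := by omega
          rw [pv_dedup_F_ge orden disponibles _ hn hge,
            pv_F_le orden disponibles orden.length (le_refl _), List.take_length]
        · -- the pointer stopped at available position number conductores.length - 1
          rw [if_neg hcm]
          have hlt : conductores.length - 1 < (pvAP orden disponibles).length := by omega
          have hNP : pvNP orden disponibles conductores.length =
              (pvAP orden disponibles).getD (conductores.length - 1) 0 + 1 := by
            rw [pvNP, if_neg hc0, Nat.div_eq_of_lt hlt, Nat.mod_eq_of_lt hlt,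
              Nat.mul_zero, Nat.zero_add]
          have hgd : (pvAP orden disponibles).getD (conductores.length - 1) 0 =
              (pvAP orden disponibles)[conductores.length - 1]'hlt :=
            List.getD_eq_getElem _ _ hlt
          have hxlt : (pvAP orden disponibles)[conductores.length - 1]'hlt < orden.length :=
            (pv_AP_lt orden disponibles hlt).1
          rw [hNP, hgd, pv_F_le orden disponibles _ (by omega)]
          have hav := (pv_AP_lt orden disponibles hlt).2
          simp only [pvAvail] at hav
          rw [List.getD_eq_getElem _ _ hxlt] at hav
          rw [List.take_add_one, List.getElem?_eq_getElem hxlt]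
          have hav' : orden[(pvAP orden disponibles)[conductores.length - 1]'hlt]'hxlt ∈
              disponibles := by simpa using hav
          simp only [Option.toList_some, List.filter_append, List.filter_singleton]
          simp [hav']
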